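-- pv_equiv track=rewrite | github.com/hdcola/hdtools | videotool/split.py | split_time
-- ===== SOURCE A (Python) =====
-- def split_time(movie_time,n):
--     # 将movie_time切为n段，输入 30 返回 [0,10,10,10]
--     s = [0]
--     t = 0
--     for i in range(n):
--         if i == n-1:
--             t = movie_time
--         else:
--             t += int(movie_time/n)
--         s.append(t)
--     return s
-- ===== SOURCE B (Python) =====
-- def split_time(movie_time, n):
--     # closed-form construction: interior boundary j is j*step; last is movie_time itself
--     if n < 1:
--         return [0]
--     step = int(movie_time / n)
--     return [0] + [j * step for j in range(1, n)] + [movie_time]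
-- ===== Notes on version B (the rewrite author's own statement) =====
-- stated objective: simpler
-- what changed: Replaced the stateful running-total loop (with an in-loop last-iteration branch) by a direct closed-form list construction: [0] + [j*step for j in range(1,n)] + [movie_time].
import Mathlib
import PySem

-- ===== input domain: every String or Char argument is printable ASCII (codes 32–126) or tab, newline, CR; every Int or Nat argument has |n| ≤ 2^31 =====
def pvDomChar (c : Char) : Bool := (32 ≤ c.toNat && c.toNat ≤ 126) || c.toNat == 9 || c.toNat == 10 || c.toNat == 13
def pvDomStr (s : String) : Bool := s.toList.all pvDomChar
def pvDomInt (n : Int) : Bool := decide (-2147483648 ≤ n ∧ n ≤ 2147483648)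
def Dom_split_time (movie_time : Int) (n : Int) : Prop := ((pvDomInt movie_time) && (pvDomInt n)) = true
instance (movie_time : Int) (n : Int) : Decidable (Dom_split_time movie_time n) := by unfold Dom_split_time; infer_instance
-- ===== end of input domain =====

-- B replaces A's running-total loop by a closed-form construction [0] ++ [j*step] ++ [movie_time]; objective: simpler.


-- ===== PORT A =====
-- int(movie_time/n) is float division truncated toward zero; on |movie_time|,|n| ≤ 2^31 this is
-- exactly truncated integer division (the rounding error < 2^-22 cannot cross an integer there),
-- so it is ported as Int.tdiv.
def split_time (movie_time : Int) (n : Int) : List Int :=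
  ((PySem.List.pyRange 0 n 1).foldl
    (fun (st : List Int × Int) i =>
      let t := if i = n - 1 then movie_time else st.2 + Int.tdiv movie_time n
      (st.1 ++ [t], t))
    ([0], 0)).1

-- ===== PORT B =====
def split_time_alt (movie_time : Int) (n : Int) : List Int :=
  if n < 1 then [0]
  else [0] ++ (PySem.List.pyRange 1 n 1).map (fun j => j * Int.tdiv movie_time n) ++ [movie_time]

-- ===== PRECONDITION & SPEC =====
def Spec_split_time (movie_time : Int) (n : Int) (out : List Int) : Prop := out = split_time_alt movie_time n
instance (movie_time : Int) (n : Int) (out : List Int) : Decidable (Spec_split_time movie_time n out) := by unfold Spec_split_time; infer_instance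

-- ===== CLAIM (what is proved, stated in full; the proofs are below) =====
def Claim_equal_split_time : Prop := ∀ (movie_time : Int) (n : Int), Dom_split_time movie_time n → Spec_split_time movie_time n (split_time movie_time n)

-- ===== LEMMAS AND PROOFS =====

-- Invariant of A's loop on the first m (non-final) iterations.
lemma split_time_fold_prefix (movie_time n : Int) (m : Nat) (hm : (m : Int) ≤ n - 1) :
    (PySem.List.pyRange 0 (m : Int) 1).foldl
      (fun (st : List Int × Int) i =>
        let t := if i = n - 1 then movie_time else st.2 + Int.tdiv movie_time n
        (st.1 ++ [t], t))
      ([0], 0)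
    = ([0] ++ (PySem.List.pyRange 1 ((m : Int) + 1) 1).map (fun j => j * Int.tdiv movie_time n),
       (m : Int) * Int.tdiv movie_time n) := by
  induction m with
  | zero =>
    rw [PySem.List.pyRange_one_eq_nil (by norm_num), PySem.List.pyRange_one_eq_nil (by norm_num)]
    simp
  | succ k ih =>
    have hk : (k : Int) ≤ n - 1 := by push_cast at hm ⊢; omega
    have h1 : ((k + 1 : Nat) : Int) = (k : Int) + 1 := by push_cast; ring
    rw [h1, PySem.List.pyRange_one_succ_right (by positivity), List.foldl_append, ih hk]
    have hne : (k : Int) ≠ n - 1 := by push_cast at hm; omega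
    simp only [List.foldl_cons, List.foldl_nil, if_neg hne]
    rw [PySem.List.pyRange_one_succ_right (by omega : (1:Int) ≤ (k:Int) + 1)]
    simp
    ring

lemma split_time_eq_alt (movie_time n : Int) :
    split_time movie_time n = split_time_alt movie_time n := by
  unfold split_time split_time_alt
  by_cases hn : n < 1
  · rw [if_pos hn, PySem.List.pyRange_one_eq_nil (by omega)]
    simp
  · rw [if_neg hn]
    have h1 : (1:Int) ≤ n := by omega
    have hm : (((n - 1).toNat : Int)) = n - 1 := by omega
    have hsplit : PySem.List.pyRange 0 n 1
        = PySem.List.pyRange 0 (n - 1) 1 ++ [n - 1] := by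
      have := PySem.List.pyRange_one_succ_right (a := 0) (b := n - 1) (by omega)
      simpa using this
    rw [hsplit, List.foldl_append]
    have := split_time_fold_prefix movie_time n (n - 1).toNat (by omega)
    rw [hm] at this
    rw [this]
    simp

-- ===== VERDICT (by name: the statement is the Claim_ definition above) =====
theorem split_time_spec : Claim_equal_split_time := by
  intro movie_time n _
  unfold Spec_split_time
  exact split_time_eq_alt movie_time n
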